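-- pv_equiv track=rewrite | github.com/switchbox-data/buildstock-fetch | utils/ev_utils.py | assign_nhts_income_bucket
-- ===== SOURCE A (Python) =====
-- def assign_nhts_income_bucket(income: int) -> int:
--     """
--     Assign an income bucket to an NHTS income value.
--
--     Args:
--         income: Annual household income in dollars
--
--     Returns:
--         NHTS income bucket number (1-11)
--
--     NHTS Income Buckets:
--         01 = Less than $10,000
--         02 = $10,000 to $14,999
--         03 = $15,000 to $24,999
--         04 = $25,000 to $34,999
--         05 = $35,000 to $49,999
--         06 = $50,000 to $74,999
--         07 = $75,000 to $99,999
--         08 = $100,000 to $124,999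
--         09 = $125,000 to $149,999
--         10 = $150,000 to $199,999
--         11 = $200,000 or more
--     """
--     # List of (threshold, bucket) pairs
--     income_buckets = [
--         (10000, 1),
--         (15000, 2),
--         (25000, 3),
--         (35000, 4),
--         (50000, 5),
--         (75000, 6),
--         (100000, 7),
--         (125000, 8),
--         (150000, 9),
--         (200000, 10),
--         (float("inf"), 11),  # Catch all for $200,000 or more
--     ]
--
--     for threshold, bucket in income_buckets:
--         if income < threshold:
--             return bucket
--
--     return 11  # Should never reach here due to inf threshold, but makes mypy happy
-- ===== SOURCE B (Python) =====
-- import bisect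
--
-- _THRESHOLDS = [10000, 15000, 25000, 35000, 50000, 75000, 100000, 125000, 150000, 200000]
--
-- def assign_nhts_income_bucket(income: int) -> int:
--     return bisect.bisect_right(_THRESHOLDS, income) + 1
-- ===== Notes on version B (the rewrite author's own statement) =====
-- stated objective: idiomatic
-- what changed: Replaced the sequential scan over (threshold, bucket) pairs with a binary search (bisect_right) over the sorted threshold list, deriving the bucket from the insertion index.
import Mathlib
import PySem

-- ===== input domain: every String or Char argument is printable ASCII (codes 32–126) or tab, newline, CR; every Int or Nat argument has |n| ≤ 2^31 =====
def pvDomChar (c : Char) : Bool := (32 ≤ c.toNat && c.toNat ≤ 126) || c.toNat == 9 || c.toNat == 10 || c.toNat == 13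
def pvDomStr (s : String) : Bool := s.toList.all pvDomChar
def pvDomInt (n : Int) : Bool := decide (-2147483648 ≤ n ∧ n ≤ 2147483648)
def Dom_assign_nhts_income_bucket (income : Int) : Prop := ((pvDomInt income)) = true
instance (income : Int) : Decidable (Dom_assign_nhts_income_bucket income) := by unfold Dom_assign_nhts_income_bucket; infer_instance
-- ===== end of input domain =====

-- B replaces A's sequential scan over (threshold, bucket) pairs with a binary search
-- (bisect_right) over the sorted thresholds; idiomatic, same exact result.


-- ===== PORT A =====
-- the ten finite (threshold, bucket) pairs; the final (inf, 11) pair is modelled by the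
-- base case of the loop, exact because income < inf holds for every int
def pvIncomeBuckets : List (Int × Int) :=
  [(10000, 1), (15000, 2), (25000, 3), (35000, 4), (50000, 5),
   (75000, 6), (100000, 7), (125000, 8), (150000, 9), (200000, 10)]

def pvLoopA (income : Int) : List (Int × Int) → Int
  | [] => 11            -- the (float("inf"), 11) pair: income < inf is always true
  | (t, b) :: rest => if income < t then b else pvLoopA income rest

def assign_nhts_income_bucket (income : Int) : Int :=
  pvLoopA income pvIncomeBuckets

-- ===== PORT B =====
def pvThresholds : List Int :=
  [10000, 15000, 25000, 35000, 50000, 75000, 100000, 125000, 150000, 200000]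

-- transliteration of CPython's bisect.bisect_right lo/hi loop
def pvBisectRight (xs : List Int) (x : Int) (lo hi : Nat) : Nat :=
  if h : lo < hi then
    let mid := (lo + hi) / 2
    if x < xs.getD mid 0 then pvBisectRight xs x lo mid
    else pvBisectRight xs x (mid + 1) hi
  else lo
termination_by hi - lo
decreasing_by all_goals omega

def assign_nhts_income_bucket_alt (income : Int) : Int :=
  (pvBisectRight pvThresholds income 0 pvThresholds.length : Int) + 1

-- ===== PRECONDITION & SPEC =====
def Spec_assign_nhts_income_bucket (income : Int) (out : Int) : Prop := out = assign_nhts_income_bucket_alt income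
instance (income : Int) (out : Int) : Decidable (Spec_assign_nhts_income_bucket income out) := by unfold Spec_assign_nhts_income_bucket; infer_instance

-- ===== CLAIM (what is proved, stated in full; the proofs are below) =====
def Claim_equal_assign_nhts_income_bucket : Prop := ∀ (income : Int), Dom_assign_nhts_income_bucket income → Spec_assign_nhts_income_bucket income (assign_nhts_income_bucket income)

-- ===== LEMMAS AND PROOFS =====

-- ===== VERDICT (by name: the statement is the Claim_ definition above) =====
set_option maxRecDepth 8000 in
theorem assign_nhts_income_bucket_spec : Claim_equal_assign_nhts_income_bucket := by
  intro income _
  unfold Spec_assign_nhts_income_bucket assign_nhts_income_bucket assign_nhts_income_bucket_alt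
  simp only [pvIncomeBuckets, pvLoopA]
  simp [pvBisectRight, pvThresholds, List.getD]
  split_ifs <;> omega
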